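-- pv_equiv track=rewrite | github.com/jpcortesg/Competitive-Programming | Contest/Contest-Vacational/coding-decoding.py | coding
-- ===== SOURCE A (Python) =====
-- def coding(st, s, ret):
--     if(s == 1 or s == 2):
--         ret += st
--         return ret
--     else:
--         if(s % 2 == 0):
--             ret += st[ int(s / 2) - 1]
--             st = st[: int(s / 2) - 1] + st[int(s / 2):]
--             return coding(st, s-1, ret)
--         else:
--             ret += st[int((s-1) / 2)]
--             st = st[: int((s-1) / 2)] + st[int((s-1) / 2 + 1):]
--             return coding(st, s-1, ret)
-- ===== SOURCE B (Python) =====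
-- def coding(st, s, ret):
--     # Closed form: A's repeated middle-removal emits the middle character and
--     # then the rest of the first s characters middle-out (alternating sides),
--     # followed by any characters past index s.
--     if s == 1 or s == 2:
--         return ret + st
--     m = (s - 1) // 2
--     left = st[:m][::-1]          # m-1, m-2, ..., 0
--     right = st[m + 1:s]          # m+1, ..., s-1
--     a, b = (right, left) if s % 2 == 0 else (left, right)
--     out = [st[m]]
--     for x, y in zip(a, b):
--         out.append(x)
--         out.append(y)
--     k = min(len(a), len(b))
--     out.append(a[k:])
--     out.append(b[k:])
--     return ret + ''.join(out) + st[s:]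
-- ===== Notes on version B (the rewrite author's own statement) =====
-- stated objective: faster
-- what changed: Replaces A's O(n^2) recursion (each step slices the string to delete its middle character) by a closed form: the removal order is exactly the first s characters read middle-out (middle, then alternating sides, right first for even s), emitted in one pass with two slices and a zip.
import Mathlib
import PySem

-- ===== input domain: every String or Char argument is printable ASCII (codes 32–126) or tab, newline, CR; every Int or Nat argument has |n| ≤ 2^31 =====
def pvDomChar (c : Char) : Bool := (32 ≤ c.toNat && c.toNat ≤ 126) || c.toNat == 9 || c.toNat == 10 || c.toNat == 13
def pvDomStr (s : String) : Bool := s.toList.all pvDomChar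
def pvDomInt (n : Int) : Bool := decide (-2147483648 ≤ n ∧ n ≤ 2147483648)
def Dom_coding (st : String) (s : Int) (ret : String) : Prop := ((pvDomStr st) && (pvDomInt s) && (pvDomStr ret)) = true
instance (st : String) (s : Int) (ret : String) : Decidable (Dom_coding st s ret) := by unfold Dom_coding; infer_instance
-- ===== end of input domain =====

-- B replaces A's O(n^2) recursive middle-removal by a closed-form middle-out interleave of the
-- first s characters (objective: faster, asymptotic O(n) vs O(n^2)).

-- ===== PORT A =====
-- Strings are ported through List Char (PySem convention); the wrapper converts at the boundary.
def codingAuxA (st : List Char) (s : Int) (ret : List Char) : List Char :=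
  if s = 1 ∨ s = 2 then ret ++ st
  else if _h : s ≤ 2 then ret   -- totality guard: Python recurses forever here (s ≤ 0); outside Pre_
  else if PySem.Int.mod s 2 = 0 then
    -- int(s / 2) = s // 2 exactly, for the positive s < 2^53 reachable here
    match PySem.List.pyGet? st (PySem.Int.floordiv s 2 - 1) with
    | none => ret   -- IndexError; outside Pre_
    | some c =>
        codingAuxA
          (PySem.List.slice st none (some (PySem.Int.floordiv s 2 - 1)) ++
           PySem.List.slice st (some (PySem.Int.floordiv s 2)) none)
          (s - 1) (ret ++ [c])
  else
    match PySem.List.pyGet? st (PySem.Int.floordiv (s - 1) 2) with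
    | none => ret   -- IndexError; outside Pre_
    | some c =>
        codingAuxA
          (PySem.List.slice st none (some (PySem.Int.floordiv (s - 1) 2)) ++
           PySem.List.slice st (some (PySem.Int.floordiv (s - 1) 2 + 1)) none)
          (s - 1) (ret ++ [c])
termination_by s.toNat
decreasing_by all_goals omega

def coding (st : String) (s : Int) (ret : String) : String :=
  String.ofList (codingAuxA st.toList s ret.toList)

-- ===== PORT B =====
-- Source B's zip loop plus the two leftover slices: pairs while both lists last, then the rest.
def interZip {α : Type} : List α → List α → List α
  | x :: a, y :: b => x :: y :: interZip a b
  | a, b => a ++ b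

def codingAuxB (st : List Char) (s : Int) (ret : List Char) : List Char :=
  if s = 1 ∨ s = 2 then ret ++ st
  else
    let m := PySem.Int.floordiv (s - 1) 2
    let left := (PySem.List.slice st none (some m)).reverse
    let right := PySem.List.slice st (some (m + 1)) (some s)
    let p := if PySem.Int.mod s 2 = 0 then (right, left) else (left, right)
    match PySem.List.pyGet? st m with
    | none => ret   -- st[m] raises IndexError; outside Pre_
    | some c => ret ++ (c :: interZip p.1 p.2) ++ PySem.List.slice st (some s) none

def coding_alt (st : String) (s : Int) (ret : String) : String :=
  String.ofList (codingAuxB st.toList s ret.toList)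

-- ===== PRECONDITION & SPEC =====
-- Exactly the inputs on which Python A returns: for s ≤ 0 it recurses forever (RecursionError),
-- and for 3 ≤ s it raises IndexError as soon as s exceeds len(st) + 1.
def Pre_coding (st : String) (s : Int) (ret : String) : Prop :=
  1 ≤ s ∧ (s ≤ 2 ∨ s ≤ PySem.Str.len st + 1)
instance (st : String) (s : Int) (ret : String) : Decidable (Pre_coding st s ret) := by
  unfold Pre_coding; infer_instance

def pvWitness_coding : String × Int × String := ("abcdef", 6, "")

def Spec_coding (st : String) (s : Int) (ret : String) (out : String) : Prop := out = coding_alt st s ret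
instance (st : String) (s : Int) (ret : String) (out : String) : Decidable (Spec_coding st s ret out) := by unfold Spec_coding; infer_instance

-- ===== CLAIM (what is proved, stated in full; the proofs are below) =====
def Claim_equal_coding : Prop := ∀ (st : String) (s : Int) (ret : String), Dom_coding st s ret → Pre_coding st s ret → Spec_coding st s ret (coding st s ret)

-- ===== LEMMAS AND PROOFS =====

-- The value both programs append to ret: middle char of the first n, then the two sides
-- interleaved middle-out, then everything past index n.
def midOut (l : List Char) (n : Nat) : List Char :=
  if n ≤ 2 then l
  else
    let m := (n - 1) / 2
    l[m]?.getD 'A' ::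
      (if n % 2 = 0 then interZip ((l.drop (m + 1)).take (n - (m + 1))) ((l.take m).reverse)
       else interZip ((l.take m).reverse) ((l.drop (m + 1)).take (n - (m + 1)))) ++ l.drop n

theorem interZip_cons {α : Type} (x : α) (a b : List α) :
    interZip (x :: a) b = x :: interZip b a := by
  induction b generalizing x a with
  | nil => cases a <;> simp [interZip]
  | cons y b ih =>
    cases a with
    | nil => simp [interZip]
    | cons z a' => simp [interZip, ih]

theorem midOut_le_two (l : List Char) (n : Nat) (h : n ≤ 2) : midOut l n = l := by
  simp [midOut, h]

theorem drop_append_ge {α : Type} (a b : List α) (m : Nat) (h : a.length ≤ m) :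
    (a ++ b).drop m = b.drop (m - a.length) := by
  rw [List.drop_append, List.drop_eq_nil_of_le h, List.nil_append]

theorem midOut_step (l : List Char) (n : Nat) (h3 : 3 ≤ n) (hlen : n ≤ l.length + 1) :
    midOut l n =
      l[(n - 1) / 2]?.getD 'A' ::
        midOut (l.take ((n - 1) / 2) ++ l.drop ((n - 1) / 2 + 1)) (n - 1) := by
  by_cases hn3 : n = 3
  · subst hn3
    match l, hlen with
    | x :: y :: t, _ =>
      cases t <;> simp [midOut, interZip]
  · -- n ≥ 4
    have h4 : 4 ≤ n := by omega
    have hmL : (n - 1) / 2 < l.length := by omega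
    have htk : (l.take ((n - 1) / 2)).length = (n - 1) / 2 :=
      List.length_take_of_le (by omega)
    set m := (n - 1) / 2 with hm_def
    set l' := l.take m ++ l.drop (m + 1) with hl'
    have hC : l'.take m = l.take m := by
      rw [hl', List.take_append_of_le_length (by omega), List.take_take]
      simp
    have hC' : ∀ k, k ≤ m → l'.take k = l.take k := by
      intro k hk
      rw [hl', List.take_append_of_le_length (by omega), List.take_take,
        Nat.min_eq_left hk]
    have hB : l'.drop (m + 1) = l.drop (m + 2) := by
      rw [hl', drop_append_ge _ _ _ (by omega), htk,
        show m + 1 - m = 1 by omega, List.drop_drop]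
    have hBm : l'.drop m = l.drop (m + 1) := by
      rw [hl', drop_append_ge _ _ _ (by omega), htk, Nat.sub_self, List.drop_zero]
    have hD : l'.drop (n - 1) = l.drop n := by
      rw [hl', drop_append_ge _ _ _ (by omega), htk, List.drop_drop,
        show m + 1 + (n - 1 - m) = n by omega]
    by_cases hp : n % 2 = 0
    · -- even n: the next midOut removes index m of l', which is l[m+1]
      have hm1L : m + 1 < l.length := by omega
      have hE : l.drop (m + 1) = l[m + 1] :: l.drop (m + 2) :=
        List.drop_eq_getElem_cons hm1L
      have e_get : l'[m]? = some l[m + 1] := by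
        rw [hl', List.getElem?_append_right (by omega), htk, Nat.sub_self,
          List.getElem?_drop, List.getElem?_eq_getElem (by omega : m + 1 + 0 < l.length)]
      have e_m' : (n - 1 - 1) / 2 = m := by omega
      rw [midOut, if_neg (by omega : ¬ n ≤ 2), midOut, if_neg (by omega : ¬ n - 1 ≤ 2)]
      simp only [e_m', hp, if_pos, hC, hB, hD, e_get,
        if_neg (by omega : ¬ (n - 1) % 2 = 0)]
      rw [hE, show n - (m + 1) = (n - m - 2) + 1 by omega, List.take_succ_cons,
        interZip_cons, show n - 1 - (m + 1) = n - m - 2 by omega]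
      simp [← hm_def]
    · -- odd n ≥ 5: the next midOut removes index m-1 of l', which is l[m-1]
      have h5 : 5 ≤ n := by omega
      obtain ⟨k, hk⟩ : ∃ k, m = k + 1 := ⟨m - 1, by omega⟩
      have hF : l.take m = l.take k ++ [l[k]] := by
        rw [hk, List.take_add_one, List.getElem?_eq_getElem (by omega : k < l.length)]
        simp
      have e_get : l'[k]? = some l[k] := by
        rw [hl', List.getElem?_append_left (by omega),
          List.getElem?_take_of_lt (by omega),
          List.getElem?_eq_getElem (by omega : k < l.length)]
      have e_m' : (n - 1 - 1) / 2 = k := by omega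
      rw [midOut, if_neg (by omega : ¬ n ≤ 2), midOut, if_neg (by omega : ¬ n - 1 ≤ 2)]
      simp only [e_m', ← hk, hC' k (by omega), hBm, hD, e_get,
        if_neg hp, if_pos (by omega : (n - 1) % 2 = 0)]
      rw [hF, List.reverse_append, List.reverse_singleton, List.singleton_append,
        interZip_cons, show n - 1 - m = n - (m + 1) by omega]
      simp [← hm_def]

theorem codingAuxB_eq (l ret : List Char) (n : Nat) (h1 : 1 ≤ n)
    (h2 : n ≤ 2 ∨ n ≤ l.length + 1) :
    codingAuxB l (n : Int) ret = ret ++ midOut l n := by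
  by_cases hle : n ≤ 2
  · have hc : (n : Int) = 1 ∨ (n : Int) = 2 := by omega
    simp only [codingAuxB, if_pos hc, midOut_le_two l n hle]
  · have h3 : 3 ≤ n := by omega
    have hlen : n ≤ l.length + 1 := by rcases h2 with h | h <;> omega
    have hm : (n - 1) / 2 < l.length := by omega
    have e1 : PySem.Int.floordiv ((n : Int) - 1) 2 = (((n - 1) / 2 : Nat) : Int) := by
      rw [show ((n : Int) - 1) = (((n - 1 : Nat)) : Int) by omega,
        PySem.Int.floordiv_eq_ediv_of_pos (by norm_num)]
      omega
    have e2 : PySem.Int.mod (n : Int) 2 = ((n % 2 : Nat) : Int) := by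
      rw [PySem.Int.mod_eq_emod_of_pos (by norm_num)]; omega
    have e3 : (((n - 1) / 2 : Nat) : Int) + 1 = (((n - 1) / 2 + 1 : Nat) : Int) := by push_cast; ring
    simp only [codingAuxB, if_neg (show ¬((n : Int) = 1 ∨ (n : Int) = 2) by omega), e1, e2, e3,
      PySem.List.slice_to_natCast, PySem.List.slice_natCast, PySem.List.slice_from_natCast,
      PySem.List.pyGet?_natCast, List.getElem?_eq_getElem hm]
    unfold midOut
    rw [if_neg (show ¬ n ≤ 2 by omega)]
    by_cases hp : n % 2 = 0
    · simp [hp, List.getElem?_eq_getElem hm]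
    · simp [hp, List.getElem?_eq_getElem hm, show ¬((2:Int) ∣ (n:Int)) by omega]

theorem codingAuxA_eq (n : Nat) (l₀ ret₀ : List Char) (h1₀ : 1 ≤ n)
    (h2₀ : n ≤ 2 ∨ n ≤ l₀.length + 1) :
    codingAuxA l₀ (n : Int) ret₀ = ret₀ ++ midOut l₀ n := by
  induction n using Nat.strong_induction_on generalizing l₀ ret₀ with
  | _ n ih =>
  by_cases hle : n ≤ 2
  · have hc : (n : Int) = 1 ∨ (n : Int) = 2 := by omega
    rw [codingAuxA, if_pos hc, midOut_le_two l₀ n hle]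
  · have h3 : 3 ≤ n := by omega
    have hlen : n ≤ l₀.length + 1 := by rcases h2₀ with h | h <;> omega
    have hm : (n - 1) / 2 < l₀.length := by omega
    have ef : PySem.Int.floordiv (n : Int) 2 = ((n / 2 : Nat) : Int) := by
      rw [PySem.Int.floordiv_eq_ediv_of_pos (by norm_num)]; omega
    have ef1 : PySem.Int.floordiv ((n : Int) - 1) 2 = (((n - 1) / 2 : Nat) : Int) := by
      rw [show ((n : Int) - 1) = (((n - 1 : Nat)) : Int) by omega,
        PySem.Int.floordiv_eq_ediv_of_pos (by norm_num)]
      omega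
    have e2 : PySem.Int.mod (n : Int) 2 = ((n % 2 : Nat) : Int) := by
      rw [PySem.Int.mod_eq_emod_of_pos (by norm_num)]; omega
    have hlen' : n - 1 ≤ (l₀.take ((n - 1) / 2) ++ l₀.drop ((n - 1) / 2 + 1)).length + 1 := by
      simp [List.length_take, List.length_drop]; omega
    have hcast : ((n : Int) - 1) = (((n - 1 : Nat)) : Int) := by omega
    rw [codingAuxA, if_neg (show ¬((n : Int) = 1 ∨ (n : Int) = 2) by omega),
      dif_neg (show ¬((n : Int) ≤ 2) by omega)]
    by_cases hp : n % 2 = 0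
    · have hidx : PySem.Int.floordiv (n : Int) 2 - 1 = (((n - 1) / 2 : Nat) : Int) := by
        rw [ef]; omega
      have hdrop : PySem.Int.floordiv (n : Int) 2 = ((((n - 1) / 2 + 1 : Nat)) : Int) := by
        rw [ef]; omega
      rw [if_pos (show PySem.Int.mod (n : Int) 2 = 0 by rw [e2, hp]; rfl), hidx, hdrop]
      simp only [PySem.List.pyGet?_natCast, List.getElem?_eq_getElem hm,
        PySem.List.slice_to_natCast, PySem.List.slice_from_natCast, hcast]
      rw [ih (n - 1) (by omega) _ _ (by omega) (Or.inr hlen'),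
        midOut_step l₀ n h3 hlen, List.getElem?_eq_getElem hm]
      simp
    · have hodd : ¬ PySem.Int.mod (n : Int) 2 = 0 := by
        rw [e2]; omega
      have hcast1 : (((n - 1) / 2 : Nat) : Int) + 1 = ((((n - 1) / 2 + 1 : Nat)) : Int) := by
        push_cast; ring
      have ef1' : PySem.Int.floordiv (((n - 1 : Nat)) : Int) 2 = (((n - 1) / 2 : Nat) : Int) := by
        rw [PySem.Int.floordiv_eq_ediv_of_pos (by norm_num)]; omega
      rw [if_neg hodd]
      simp only [hcast, ef1', hcast1, PySem.List.pyGet?_natCast, List.getElem?_eq_getElem hm,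
        PySem.List.slice_to_natCast, PySem.List.slice_from_natCast]
      rw [ih (n - 1) (by omega) _ _ (by omega) (Or.inr hlen'),
        midOut_step l₀ n h3 hlen, List.getElem?_eq_getElem hm]
      simp

-- ===== VERDICT (by name: the statement is the Claim_ definition above) =====
theorem coding_spec : Claim_equal_coding := by
  intro st s ret _hdom hpre
  unfold Spec_coding coding coding_alt
  obtain ⟨h1, h2⟩ := hpre
  rw [PySem.Str.len_eq] at h2
  have hs : s = ((s.toNat : Nat) : Int) := by omega
  rw [hs, codingAuxA_eq s.toNat _ _ (by omega) (by omega),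
    codingAuxB_eq _ _ s.toNat (by omega) (by omega)]
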